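-- pv_equiv track=rewrite | github.com/calico923/paperspace-civitiai-downloader | model_metadata_scanner.py | _detect_lora_subcategory
-- ===== SOURCE A (Python) =====
-- from typing import Dict, List, Optional, Tuple, Any
--
-- def _detect_lora_subcategory(tags: List[str]) -> Optional[str]:
--     """
--     tags から LoRA のサブカテゴリを判定
--
--     優先順位: style, poses, concept, character, clothing, background, objects
--
--     Args:
--         tags: モデルの tags 配列
--
--     Returns:
--         サブカテゴリ名、該当なしの場合は None
--     """
--     if not tags:
--         return None
--
--     # 小文字変換して検索
--     tags_lower = [tag.lower() for tag in tags]
--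
--     # 優先順位順にチェック
--     subcategories = [
--         'style',
--         'poses',
--         'concept',
--         'character',
--         'clothing',
--         'background',
--         'objects'
--     ]
--
--     for category in subcategories:
--         if category in tags_lower:
--             return category
--
--     return 'other'  # どれにも該当しない場合
-- ===== SOURCE B (Python) =====
-- _PRIORITY = {
--     'style': 0,
--     'poses': 1,
--     'concept': 2,
--     'character': 3,
--     'clothing': 4,
--     'background': 5,
--     'objects': 6,
-- }
--
-- _SUBCATEGORIES = ['style', 'poses', 'concept', 'character', 'clothing', 'background', 'objects']
--
--
-- def _detect_lora_subcategory(tags):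
--     if not tags:
--         return None
--     best = None
--     for tag in tags:
--         i = _PRIORITY.get(tag.lower())
--         if i is not None and (best is None or i < best):
--             best = i
--     if best is None:
--         return 'other'
--     return _SUBCATEGORIES[best]
-- ===== Notes on version B (the rewrite author's own statement) =====
-- stated objective: alternative
-- what changed: Instead of building a lowered copy of the tags and scanning the fixed category list with a membership test per category, B makes a single pass over the tags keeping a running minimum priority index looked up in a name-to-priority dict, then renders the best index (or 'other').
import Mathlib
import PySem

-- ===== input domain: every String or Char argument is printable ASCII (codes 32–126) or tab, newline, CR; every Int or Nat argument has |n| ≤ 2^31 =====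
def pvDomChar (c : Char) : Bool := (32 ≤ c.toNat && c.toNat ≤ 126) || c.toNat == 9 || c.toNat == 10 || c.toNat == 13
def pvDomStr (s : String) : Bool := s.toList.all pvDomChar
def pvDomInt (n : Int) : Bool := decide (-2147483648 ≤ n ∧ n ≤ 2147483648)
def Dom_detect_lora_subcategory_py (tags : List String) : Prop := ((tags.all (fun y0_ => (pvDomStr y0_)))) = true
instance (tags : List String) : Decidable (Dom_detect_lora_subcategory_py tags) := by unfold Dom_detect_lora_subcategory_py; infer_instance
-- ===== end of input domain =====

-- B changes the decomposition: one pass over the tags keeping a running minimum priority index,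
-- instead of A's scan of the fixed category list with a membership test in the lowered tag list.

-- ===== PORT A =====
-- the fixed priority-ordered subcategory list of A
def pvSubcats : List String :=
  ["style", "poses", "concept", "character", "clothing", "background", "objects"]

-- 'for category in subcategories: if category in tags_lower: return category' / 'return "other"'
def pvALoop (tags_lower : List String) : List String → Option String
  | [] => some "other"
  | c :: rest => if tags_lower.contains c then some c else pvALoop tags_lower rest

def detect_lora_subcategory_py (tags : List String) : Option String :=
  if tags = [] then none
  else
    let tags_lower := tags.map PySem.Str.lower
    pvALoop tags_lower pvSubcats

-- ===== PORT B =====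
-- _PRIORITY dict of Source B
def pvPriority : PySem.Dict String Int :=
  PySem.Dict.ofList [("style", 0), ("poses", 1), ("concept", 2), ("character", 3),
                     ("clothing", 4), ("background", 5), ("objects", 6)]

-- one iteration of Source B's loop: look up the lowered tag's priority, keep the smaller index
def pvStepB (best : Option Int) (tag : String) : Option Int :=
  match pvPriority.get? (PySem.Str.lower tag) with
  | none => best
  | some i =>
    match best with
    | none => some i
    | some b => if i < b then some i else best

def detect_lora_subcategory_py_alt (tags : List String) : Option String :=
  if tags = [] then none
  else
    match tags.foldl pvStepB none with
    | none => some "other"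
    | some b => PySem.List.pyGet? pvSubcats b

-- ===== PRECONDITION & SPEC =====
def Spec_detect_lora_subcategory_py (tags : List String) (out : Option String) : Prop := out = detect_lora_subcategory_py_alt tags
instance (tags : List String) (out : Option String) : Decidable (Spec_detect_lora_subcategory_py tags out) := by unfold Spec_detect_lora_subcategory_py; infer_instance

-- ===== CLAIM (what is proved, stated in full; the proofs are below) =====
def Claim_equal_detect_lora_subcategory_py : Prop := ∀ (tags : List String), Dom_detect_lora_subcategory_py tags → Spec_detect_lora_subcategory_py tags (detect_lora_subcategory_py tags)

-- ===== LEMMAS AND PROOFS =====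

-- option-min combination realized by pvStepB
def pvMergeO : Option Int → Option Int → Option Int
  | none, y => y
  | some a, none => some a
  | some a, some b => some (min a b)

lemma pvStepB_eq_mergeO (best : Option Int) (tag : String) :
    pvStepB best tag = pvMergeO best (pvPriority.get? (PySem.Str.lower tag)) := by
  unfold pvStepB pvMergeO
  cases pvPriority.get? (PySem.Str.lower tag) with
  | none => cases best <;> rfl
  | some i =>
    cases best with
    | none => rfl
    | some b => simp only; split_ifs <;> simp <;> omega

lemma pvMergeO_assoc (a b c : Option Int) :
    pvMergeO (pvMergeO a b) c = pvMergeO a (pvMergeO b c) := by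
  cases a <;> cases b <;> cases c <;> simp [pvMergeO, min_assoc]

-- the minimum matched priority over the tags, head-first
def pvR : List String → Option Int
  | [] => none
  | t :: ts => pvMergeO (pvPriority.get? (PySem.Str.lower t)) (pvR ts)

lemma foldl_pvStepB (ts : List String) : ∀ acc, ts.foldl pvStepB acc = pvMergeO acc (pvR ts) := by
  induction ts with
  | nil => intro acc; cases acc <;> rfl
  | cons t ts ih =>
    intro acc
    simp only [List.foldl_cons, pvR, ih, pvStepB_eq_mergeO, pvMergeO_assoc]

-- whether some tag lowers to the given subcategory name
def pvM (s : String) (ts : List String) : Bool := ts.any (fun t => PySem.Str.lower t == s)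

-- pvR computes the least matched index, expressed as A's priority-ordered check chain
lemma pvR_char (ts : List String) :
    pvR ts =
      if pvM "style" ts then some 0 else if pvM "poses" ts then some 1
      else if pvM "concept" ts then some 2 else if pvM "character" ts then some 3
      else if pvM "clothing" ts then some 4 else if pvM "background" ts then some 5
      else if pvM "objects" ts then some 6 else none := by
  induction ts with
  | nil => rfl
  | cons t ts ih =>
    simp only [pvR, ih, pvM, List.any_cons]
    by_cases h0 : PySem.Str.lower t = "style"
    · simp [h0]
      split_ifs <;> rfl
    · by_cases h1 : PySem.Str.lower t = "poses"
      · simp [h1]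
        split_ifs <;> rfl
      · by_cases h2 : PySem.Str.lower t = "concept"
        · simp [h2]
          split_ifs <;> rfl
        · by_cases h3 : PySem.Str.lower t = "character"
          · simp [h3]
            split_ifs <;> rfl
          · by_cases h4 : PySem.Str.lower t = "clothing"
            · simp [h4]
              split_ifs <;> rfl
            · by_cases h5 : PySem.Str.lower t = "background"
              · simp [h5]
                split_ifs <;> rfl
              · by_cases h6 : PySem.Str.lower t = "objects"
                · simp [h6]
                  split_ifs <;> rfl
                · have hg : pvPriority.get? (PySem.Str.lower t) = none := by
                    simp [pvPriority, PySem.Dict.ofList, PySem.Dict.update,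
                          PySem.Dict.get?_insert, h0, h1, h2, h3, h4, h5, h6]
                  simp [hg, pvMergeO, h0, h1, h2, h3, h4, h5, h6]

-- A's membership test through the lowered list equals pvM
lemma contains_map_lower (ts : List String) (s : String) :
    (ts.map PySem.Str.lower).contains s = pvM s ts := by
  induction ts with
  | nil => rfl
  | cons t ts ih =>
    simp only [pvM, List.map_cons, List.contains_cons, List.any_cons] at *
    rw [ih, Bool.beq_comm]

-- ===== VERDICT (by name: the statement is the Claim_ definition above) =====
theorem detect_lora_subcategory_py_spec : Claim_equal_detect_lora_subcategory_py := by
  intro tags _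
  unfold Spec_detect_lora_subcategory_py detect_lora_subcategory_py detect_lora_subcategory_py_alt
  by_cases h : tags = []
  · simp [h]
  · simp only [h, foldl_pvStepB, pvR_char]
    simp only [pvALoop, pvSubcats, contains_map_lower, pvMergeO]
    split_ifs <;> rfl
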